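-- pv_equiv track=rewrite | github.com/SignalBuilders/walkforwardTrader | CurvePredictor.py | ensureNoShifts
-- ===== SOURCE A (Python) =====
-- def ensureNoShifts(distanceToNearestIndicies, nearestIndicies):
--     breadth = 5
--     keptDistances = []
--     keptIndicies = []
--     for i in range(len(nearestIndicies)):
--         item = nearestIndicies[i]
--
--         k = item-breadth
--         shouldAdd = True
--         while k < item + breadth:
--             if k in keptIndicies:
--                 shouldAdd = False
--                 break
--             k += 1
--         if shouldAdd == True:
--             keptDistances.append(distanceToNearestIndicies[i])
--             keptIndicies.append(item)
--     return keptDistances, keptIndicies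
-- ===== SOURCE B (Python) =====
-- def ensureNoShifts(distanceToNearestIndicies, nearestIndicies):
--     # Blocked-set strategy: keeping an index j forbids every later item in
--     # [j-4, j+5] (A keeps item iff no kept j lies in its scan window
--     # [item-5, item+4], i.e. iff no kept j has j-4 <= item <= j+5).
--     # Maintain the union of those 10-integer intervals as a hash set, so each
--     # item costs one O(1) membership test instead of a scan of the kept list.
--     keptDistances = []
--     keptIndicies = []
--     blocked = set()
--     for dist, item in zip(distanceToNearestIndicies, nearestIndicies):
--         if item not in blocked:
--             keptDistances.append(dist)
--             keptIndicies.append(item)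
--             blocked.update(range(item - 4, item + 6))
--     return keptDistances, keptIndicies
-- ===== Notes on version B (the rewrite author's own statement) =====
-- stated objective: faster
-- what changed: Replaces A's per-item scan of the 10-integer window with linear membership tests by a hash set holding the union of blocked intervals [j-4, j+5] for each kept j, so each item is a single O(1) set-membership test; iteration is over zip(distances, indices) instead of an index loop.
-- outside the precondition, e.g. on ensureNoShifts([0], [3, 4]): A returns ([0], [3]), B returns ([0], [3])
import Mathlib
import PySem

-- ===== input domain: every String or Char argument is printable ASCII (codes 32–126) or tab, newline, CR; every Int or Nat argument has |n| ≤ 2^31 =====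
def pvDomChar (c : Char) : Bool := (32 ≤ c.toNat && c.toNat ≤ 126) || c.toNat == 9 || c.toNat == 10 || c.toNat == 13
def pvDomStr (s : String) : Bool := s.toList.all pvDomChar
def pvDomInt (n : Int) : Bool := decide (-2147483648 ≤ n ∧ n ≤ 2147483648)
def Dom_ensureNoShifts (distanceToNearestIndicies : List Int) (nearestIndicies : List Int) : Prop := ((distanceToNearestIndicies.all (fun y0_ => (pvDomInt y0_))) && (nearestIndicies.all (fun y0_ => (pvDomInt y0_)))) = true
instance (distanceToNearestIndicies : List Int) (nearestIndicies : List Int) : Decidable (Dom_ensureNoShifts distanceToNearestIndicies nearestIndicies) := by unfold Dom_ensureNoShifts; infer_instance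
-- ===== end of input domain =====

-- B replaces A's per-item scan of the 10-integer window by a hash set holding the
-- union of blocked intervals [j-4, j+5] of the kept indices (one membership test per
-- item), for speed; equivalence is proved on Pre_ (distance list at least as long as
-- the index list).


-- ===== PORT A =====

-- the inner 'while k < item+breadth: if k in keptIndicies: … break; k += 1' loop;
-- returns the final value of shouldAdd
def whileCheckA (kept : List Int) (k stop : Int) : Bool :=
  if _h : k < stop then
    if kept.contains k then false else whileCheckA kept (k + 1) stop
  else true
termination_by (stop - k).toNat
decreasing_by omega

-- 'for i in range(len(nearestIndicies))' with item = nearestIndicies[i];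
-- distanceToNearestIndicies[i] is dist.getD i 0, exact under Pre_ (i < dist.length whenever read)
def loopA (dist : List Int) (rest : List Int) (i : Nat) (kd ki : List Int) : List Int × List Int :=
  match rest with
  | [] => (kd, ki)
  | item :: rest' =>
    if whileCheckA ki (item - 5) (item + 5) then
      loopA dist rest' (i + 1) (kd ++ [dist.getD i 0]) (ki ++ [item])
    else
      loopA dist rest' (i + 1) kd ki

def ensureNoShifts (distanceToNearestIndicies : List Int) (nearestIndicies : List Int) : List Int × List Int :=
  loopA distanceToNearestIndicies nearestIndicies 0 [] []

-- ===== PORT B =====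

-- Source B's 'for dist, item in zip(…): if item not in blocked: … blocked.update(range(item-4, item+6))'
def loopB (pairs : List (Int × Int)) (kd ki : List Int) (blocked : PySem.Set Int) : List Int × List Int :=
  match pairs with
  | [] => (kd, ki)
  | (dv, item) :: rest =>
    if PySem.Set.contains blocked item then
      loopB rest kd ki blocked
    else
      loopB rest (kd ++ [dv]) (ki ++ [item])
        (PySem.Set.update blocked (PySem.List.pyRange (item - 4) (item + 6) 1))

def ensureNoShifts_alt (distanceToNearestIndicies : List Int) (nearestIndicies : List Int) : List Int × List Int :=
  loopB (distanceToNearestIndicies.zip nearestIndicies) [] [] PySem.Set.empty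

-- ===== PRECONDITION & SPEC =====
-- Pre_ excludes distance lists shorter than the index list: there Python's lazy
-- distanceToNearestIndicies[i] can raise IndexError (for a few such inputs every late item
-- happens to be suppressed and A still returns — an exact carve-out would have to re-run the loop).
def Pre_ensureNoShifts (distanceToNearestIndicies : List Int) (nearestIndicies : List Int) : Prop :=
  nearestIndicies.length ≤ distanceToNearestIndicies.length
instance (distanceToNearestIndicies : List Int) (nearestIndicies : List Int) : Decidable (Pre_ensureNoShifts distanceToNearestIndicies nearestIndicies) := by unfold Pre_ensureNoShifts; infer_instance

def pvWitness_ensureNoShifts : List Int × List Int := ([3, 7], [0, 12])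

def Spec_ensureNoShifts (distanceToNearestIndicies : List Int) (nearestIndicies : List Int) (out : List Int × List Int) : Prop := out = ensureNoShifts_alt distanceToNearestIndicies nearestIndicies
instance (distanceToNearestIndicies : List Int) (nearestIndicies : List Int) (out : List Int × List Int) : Decidable (Spec_ensureNoShifts distanceToNearestIndicies nearestIndicies out) := by unfold Spec_ensureNoShifts; infer_instance

-- ===== CLAIM (what is proved, stated in full; the proofs are below) =====
def Claim_equal_ensureNoShifts : Prop := ∀ (distanceToNearestIndicies : List Int) (nearestIndicies : List Int), Dom_ensureNoShifts distanceToNearestIndicies nearestIndicies → Pre_ensureNoShifts distanceToNearestIndicies nearestIndicies → Spec_ensureNoShifts distanceToNearestIndicies nearestIndicies (ensureNoShifts distanceToNearestIndicies nearestIndicies)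

-- ===== LEMMAS AND PROOFS =====

lemma whileCheckA_iff (kept : List Int) (k stop : Int) :
    whileCheckA kept k stop = true ↔ ∀ j ∈ kept, ¬(k ≤ j ∧ j < stop) := by
  fun_induction whileCheckA with
  | case1 k h hc =>
    simp only [Bool.false_eq_true, false_iff]
    intro hall
    exact hall k (by simpa using hc) ⟨le_refl k, h⟩
  | case2 k h hc ih =>
    rw [ih]
    constructor
    · intro hall j hj ⟨h1, h2⟩
      rcases eq_or_lt_of_le h1 with rfl | hlt
      · exact absurd (by simpa using hj) (by simpa using hc)
      · exact hall j hj ⟨by omega, h2⟩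
    · intro hall j hj ⟨h1, h2⟩
      exact hall j hj ⟨by omega, h2⟩
  | case3 k h =>
    simp only [true_iff]
    intro j hj ⟨h1, h2⟩
    omega

-- the blocked set is exactly the union of the intervals [j-4, j+5] over kept j,
-- so 'item not in blocked' is exactly A's window check
lemma contains_eq_not_whileCheckA (ki : List Int) (blocked : PySem.Set Int) (item : Int)
    (hinv : ∀ x : Int, x ∈ blocked ↔ ∃ j ∈ ki, j - 4 ≤ x ∧ x ≤ j + 5) :
    PySem.Set.contains blocked item = !whileCheckA ki (item - 5) (item + 5) := by
  rw [Bool.eq_iff_iff]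
  rw [Bool.not_eq_true', ← Bool.not_eq_true (whileCheckA _ _ _)]
  rw [PySem.Set.contains_iff, hinv, whileCheckA_iff]
  push Not
  constructor
  · rintro ⟨j, hj, h1, h2⟩; exact ⟨j, hj, by omega, by omega⟩
  · rintro ⟨j, hj, h1, h2⟩; exact ⟨j, hj, by omega, by omega⟩

lemma update_invariant (ki : List Int) (blocked : PySem.Set Int) (item : Int)
    (hinv : ∀ x : Int, x ∈ blocked ↔ ∃ j ∈ ki, j - 4 ≤ x ∧ x ≤ j + 5) :
    ∀ x : Int, x ∈ PySem.Set.update blocked (PySem.List.pyRange (item - 4) (item + 6) 1) ↔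
      ∃ j ∈ ki ++ [item], j - 4 ≤ x ∧ x ≤ j + 5 := by
  intro x
  rw [PySem.Set.mem_update, hinv, PySem.List.mem_pyRange_one]
  constructor
  · rintro (⟨j, hj, h1, h2⟩ | ⟨h1, h2⟩)
    · exact ⟨j, List.mem_append_left _ hj, h1, h2⟩
    · exact ⟨item, List.mem_append_right _ (by simp), by omega, by omega⟩
  · rintro ⟨j, hj, h1, h2⟩
    rcases List.mem_append.mp hj with hj' | hj'
    · exact Or.inl ⟨j, hj', h1, h2⟩
    · simp only [List.mem_singleton] at hj'; subst hj'; exact Or.inr ⟨by omega, by omega⟩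

lemma loop_agree (dist : List Int) :
    ∀ (rest : List Int) (i : Nat) (kd ki : List Int) (blocked : PySem.Set Int),
      i + rest.length ≤ dist.length →
      (∀ x : Int, x ∈ blocked ↔ ∃ j ∈ ki, j - 4 ≤ x ∧ x ≤ j + 5) →
      loopA dist rest i kd ki = loopB ((dist.drop i).zip rest) kd ki blocked := by
  intro rest
  induction rest with
  | nil => intro i kd ki blocked _ _; simp [loopA, loopB]
  | cons item rest' ih =>
    intro i kd ki blocked hlen hinv
    have hi : i < dist.length := by simp at hlen; omega
    have hdrop : dist.drop i = dist[i] :: dist.drop (i + 1) := List.drop_eq_getElem_cons hi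
    rw [hdrop]
    rw [loopA, List.zip_cons_cons, loopB]
    rw [contains_eq_not_whileCheckA ki blocked item hinv]
    have hgd : dist.getD i 0 = dist[i] := List.getD_eq_getElem dist 0 hi
    by_cases hc : whileCheckA ki (item - 5) (item + 5) = true
    · rw [hc]
      simp only [Bool.not_true, Bool.false_eq_true, if_false, if_true, hgd]
      exact ih (i + 1) (kd ++ [dist[i]]) (ki ++ [item]) _ (by simp at hlen ⊢; omega)
        (update_invariant ki blocked item hinv)
    · rw [Bool.not_eq_true] at hc
      rw [hc]
      simp only [Bool.not_false, Bool.false_eq_true, if_false, if_true]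
      exact ih (i + 1) kd ki blocked (by simp at hlen ⊢; omega) hinv

-- ===== VERDICT (by name: the statement is the Claim_ definition above) =====
theorem ensureNoShifts_spec : Claim_equal_ensureNoShifts := by
  intro dist near _ hpre
  unfold Spec_ensureNoShifts ensureNoShifts ensureNoShifts_alt
  have := loop_agree dist near 0 [] [] PySem.Set.empty (by simpa using hpre)
    (by intro x; simp [PySem.Set.empty])
  simpa using this
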